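-- pv_equiv track=rewrite | github.com/GUIDesignResearch/GUIGAN | code/GetSubtree/get_subtree.py | get_subNodes_ofC1
-- ===== SOURCE A (Python) =====
-- def get_subNodes_ofC1(c,Dd): # 找到Dd中只属于c的node
--     Dd_ids = [d[0] for d in Dd]
--     c_children = []
--     for d in Dd_ids:
--         if c in d:
--             if d not in c_children:
--                 c_children.append(d) # c的所有孩子
--     # 找只属于c的
--     others_subNodes = []
--     for d in c_children: # 判断d是否存在其他父节点
--         c_children1 = c_children.copy()
--         c_children1.remove(d)
--         for f in c_children1: # 在除d之外其他Dd中遍历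
--             if f in d:
--                 if d not in others_subNodes:
--                     others_subNodes.append(d)
--     c_children = [c for c in c_children if c not in others_subNodes]
--     return c_children
-- ===== SOURCE B (Python) =====
-- def get_subNodes_ofC1(c, Dd):
--     c_children = []
--     for row in Dd:
--         d = row[0]
--         if c in d and d not in c_children:
--             c_children.append(d)
--     # length-sorted scan: only shorter-or-equal, already-seen ids can be substrings
--     bad = []
--     seen = []
--     for d in sorted(c_children, key=len):
--         if any(f in d for f in seen):
--             bad.append(d)
--         seen.append(d)
--     return [d for d in c_children if d not in bad]
-- ===== Notes on version B (the rewrite author's own statement) =====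
-- stated objective: alternative
-- what changed: The quadratic copy/remove/dedup pass that builds others_subNodes is replaced by a single length-sorted scan: ids are processed shortest-first with a 'seen' list, so an id is disqualified exactly when an already-seen (shorter-or-equal, hence the only possible) id is a substring of it; the original-order children are then filtered against that bad set.
import Mathlib
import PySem

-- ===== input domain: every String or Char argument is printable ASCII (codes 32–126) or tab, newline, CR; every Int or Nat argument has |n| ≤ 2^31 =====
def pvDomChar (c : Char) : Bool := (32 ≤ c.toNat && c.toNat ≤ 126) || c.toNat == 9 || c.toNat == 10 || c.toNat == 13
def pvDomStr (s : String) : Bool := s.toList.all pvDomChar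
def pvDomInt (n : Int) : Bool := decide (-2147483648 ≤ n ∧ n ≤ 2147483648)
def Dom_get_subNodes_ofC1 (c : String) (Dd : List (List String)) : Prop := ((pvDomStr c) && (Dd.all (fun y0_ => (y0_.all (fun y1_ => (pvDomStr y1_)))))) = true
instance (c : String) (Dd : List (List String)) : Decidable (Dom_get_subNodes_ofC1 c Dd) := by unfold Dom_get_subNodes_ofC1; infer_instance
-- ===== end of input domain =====

-- B replaces A's quadratic copy/remove 'other parent' pass by a length-sorted single scan
-- with a 'seen' list (alternative decomposition, similar cost); same return value.


-- ===== PORT A =====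
def get_subNodes_ofC1 (c : String) (Dd : List (List String)) : List String :=
  -- Dd_ids = [d[0] for d in Dd]  (Pre_ guarantees every row is nonempty, so the default is never used)
  let Dd_ids := Dd.map (fun d => PySem.List.pyGetD d 0 "")
  let c_children := Dd_ids.foldl (fun acc d =>
      if PySem.Str.isIn c d then (if acc.contains d then acc else acc ++ [d]) else acc) []
  let others := c_children.foldl (fun os d =>
      let cc1 := (PySem.List.remove? c_children d).getD c_children
      cc1.foldl (fun os f =>
        if PySem.Str.isIn f d then (if os.contains d then os else os ++ [d]) else os) os) []
  c_children.filter (fun x => !(others.contains x))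

-- ===== PORT B =====
def get_subNodes_ofC1_alt (c : String) (Dd : List (List String)) : List String :=
  let c_children := Dd.foldl (fun acc row =>
      let d := PySem.List.pyGetD row 0 ""
      if PySem.Str.isIn c d && !(acc.contains d) then acc ++ [d] else acc) []
  -- length-sorted scan: only already-seen (shorter-or-equal) ids can be substrings
  let p := (PySem.List.sorted c_children (fun s => PySem.Str.len s) false).foldl
      (fun (p : List String × List String) d =>
        (if p.2.any (fun f => PySem.Str.isIn f d) then p.1 ++ [d] else p.1, p.2 ++ [d]))
      ([], [])
  c_children.filter (fun x => !(p.1.contains x))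

-- ===== PRECONDITION & SPEC =====
-- Pre_ excludes exactly the inputs where A raises IndexError: a row of Dd that is empty (d[0] fails).
def Pre_get_subNodes_ofC1 (c : String) (Dd : List (List String)) : Prop := ∀ row ∈ Dd, row ≠ []
instance (c : String) (Dd : List (List String)) : Decidable (Pre_get_subNodes_ofC1 c Dd) := by unfold Pre_get_subNodes_ofC1; infer_instance
def pvWitness_get_subNodes_ofC1 : String × List (List String) := ("a", [["ab"], ["abc"], ["xa"]])
def Spec_get_subNodes_ofC1 (c : String) (Dd : List (List String)) (out : List String) : Prop := out = get_subNodes_ofC1_alt c Dd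
instance (c : String) (Dd : List (List String)) (out : List String) : Decidable (Spec_get_subNodes_ofC1 c Dd out) := by unfold Spec_get_subNodes_ofC1; infer_instance

-- ===== CLAIM (what is proved, stated in full; the proofs are below) =====
def Claim_equal_get_subNodes_ofC1 : Prop := ∀ (c : String) (Dd : List (List String)), Dom_get_subNodes_ofC1 c Dd → Pre_get_subNodes_ofC1 c Dd → Spec_get_subNodes_ofC1 c Dd (get_subNodes_ofC1 c Dd)

-- ===== LEMMAS AND PROOFS =====

-- a fold appending d once when the guard holds builds a Nodup list
lemma nodup_dedupFoldl (p : String → Bool) (l acc : List String) (h : acc.Nodup) :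
    (l.foldl (fun acc d => if p d && !(acc.contains d) then acc ++ [d] else acc) acc).Nodup := by
  induction l generalizing acc with
  | nil => exact h
  | cons d t ih =>
    simp only [List.foldl_cons]
    by_cases hcond : (p d && !(acc.contains d)) = true
    · rw [if_pos hcond]
      have hc : d ∉ acc := by simp at hcond; exact hcond.2
      refine ih _ ?_
      rw [List.nodup_append]
      refine ⟨h, List.nodup_singleton d, ?_⟩
      intro a ha
      simp only [List.mem_singleton, forall_eq]
      exact fun e => hc (e ▸ ha)
    · rw [if_neg hcond]; exact ih _ h

-- membership in such a fold's result
lemma mem_dedupFoldl (p : String → Bool) (l acc : List String) (x : String) :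
    x ∈ l.foldl (fun acc d => if p d && !(acc.contains d) then acc ++ [d] else acc) acc ↔
      x ∈ acc ∨ (x ∈ l ∧ p x = true) := by
  induction l generalizing acc with
  | nil => simp
  | cons d t ih =>
    simp only [List.foldl_cons, ih]
    by_cases hp : p d <;> by_cases hc : d ∈ acc <;> by_cases hx : x = d <;>
      simp [hp, hc, hx]

-- A's inner loop appends d once iff some element of cc1 passes the test
lemma innerFoldA (q : String → Bool) (d : String) (cc1 os : List String) :
    cc1.foldl (fun os f =>
        if q f then (if os.contains d then os else os ++ [d]) else os) os
      = if cc1.any q && !(os.contains d) then os ++ [d] else os := by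
  induction cc1 generalizing os with
  | nil => simp
  | cons f t ih =>
    simp only [List.foldl_cons, List.any_cons]
    by_cases h1 : q f
    · rw [if_pos h1]
      by_cases h2 : os.contains d
      · have h2' : d ∈ os := List.contains_iff_mem.mp h2
        rw [if_pos h2, ih]; simp [h1, h2']
      · have h2' : d ∉ os := fun hm => h2 (List.contains_iff_mem.mpr hm)
        rw [if_neg h2, ih]
        have hc : (os ++ [d]).contains d = true := by simp
        simp [h1, h2']
    · rw [if_neg h1, ih]; simp [h1]

-- B's scan: d lands in the bad list iff some element seen before it passes the test
lemma pairFoldFstMem (q : String → String → Bool) (l : List String) (hnd : l.Nodup)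
    (bad0 seen0 : List String) (x : String) :
    x ∈ (l.foldl (fun (p : List String × List String) d =>
        (if p.2.any (fun f => q f d) then p.1 ++ [d] else p.1, p.2 ++ [d])) (bad0, seen0)).1 ↔
      x ∈ bad0 ∨ (x ∈ l ∧ ∃ f ∈ seen0 ++ l.takeWhile (fun y => y != x), q f x = true) := by
  induction l generalizing bad0 seen0 with
  | nil => simp
  | cons d t ih =>
    have hdt : d ∉ t := (List.nodup_cons.mp hnd).1
    have hnt : t.Nodup := (List.nodup_cons.mp hnd).2
    simp only [List.foldl_cons]
    rw [ih hnt]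
    by_cases hx : x = d
    · subst hx
      have htw : (x :: t).takeWhile (fun y => y != x) = ([] : List String) := by simp
      rw [htw]
      by_cases ha : seen0.any (fun f => q f x)
      · rw [if_pos ha]
        simp only [List.any_eq_true] at ha
        simp [hdt, ha]
      · rw [if_neg ha]
        simp only [List.any_eq_true] at ha
        simp [hdt, ha]
    · have htw : (d :: t).takeWhile (fun y => y != x)
          = d :: t.takeWhile (fun y => y != x) := by simp [Ne.symm hx]
      rw [htw]
      by_cases ha : seen0.any (fun f => q f d)
      · rw [if_pos ha]
        simp [hx, List.mem_append]
      · rw [if_neg ha]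
        simp [hx, List.mem_append]

-- the heart of the equivalence: 'some OTHER child is a substring of x' is the same as
-- 'some child BEFORE x in the length-sorted order is a substring of x'
lemma pred_iff (cc : List String) (hnd : cc.Nodup) (x : String) (hx : x ∈ cc) :
    (∃ f ∈ cc.erase x, PySem.Str.isIn f x = true) ↔
      ∃ f ∈ (PySem.List.sorted cc (fun s => PySem.Str.len s) false).takeWhile (fun y => y != x),
        PySem.Str.isIn f x = true := by
  set p : String → Bool := fun y => y != x with hp
  set srt := PySem.List.sorted cc (fun s => PySem.Str.len s) false with hsrt
  have hperm : srt.Perm cc := PySem.List.sorted_perm cc (fun s => PySem.Str.len s) false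
  have hndS : srt.Nodup := hperm.nodup_iff.mpr hnd
  have hxs : x ∈ srt := hperm.mem_iff.mpr hx
  have hsplit : srt.takeWhile p ++ srt.dropWhile p = srt := List.takeWhile_append_dropWhile
  have hne : srt.dropWhile p ≠ [] := by
    intro h0
    have hx2 : x ∈ srt.takeWhile p := by
      have := hsplit
      rw [h0, List.append_nil] at this
      rw [← this] at hxs; exact hxs
    have := List.mem_takeWhile_imp hx2
    simp [hp] at this
  have hhead : (srt.dropWhile p).head hne = x := by
    have := List.head_dropWhile_not p hne
    simpa [hp] using this
  have hdw : srt.dropWhile p = x :: (srt.dropWhile p).tail := by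
    conv_lhs => rw [← List.cons_head_tail hne, hhead]
  have hpw : srt.Pairwise (fun a b => PySem.Str.len a ≤ PySem.Str.len b) :=
    PySem.List.sorted_pairwise cc (fun s => PySem.Str.len s)
  have hrest : ∀ b ∈ (srt.dropWhile p).tail, PySem.Str.len x ≤ PySem.Str.len b := by
    have h1 : (srt.takeWhile p ++ x :: (srt.dropWhile p).tail).Pairwise
        (fun a b => PySem.Str.len a ≤ PySem.Str.len b) := by
      rw [← hdw, hsplit]; exact hpw
    exact (List.pairwise_cons.mp (List.pairwise_append.mp h1).2.1).1
  constructor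
  · rintro ⟨f, hf, hq⟩
    have hf' : f ≠ x ∧ f ∈ cc := (List.Nodup.mem_erase_iff hnd).mp hf
    have hfs : f ∈ srt := hperm.mem_iff.mpr hf'.2
    rw [← hsplit] at hfs
    rcases List.mem_append.mp hfs with h | h
    · exact ⟨f, h, hq⟩
    · rw [hdw] at h
      rcases List.mem_cons.mp h with rfl | h
      · exact absurd rfl hf'.1
      · exfalso
        have hle : PySem.Str.len x ≤ PySem.Str.len f := hrest f h
        have hinf : f.toList <:+: x.toList := (PySem.Str.isIn_iff_infix f x).mp hq
        have hlen : f.toList.length ≤ x.toList.length := hinf.length_le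
        have e1 : ∀ s : String, PySem.Str.len s = s.toList.length := fun s => by
          simp [PySem.Str.len]
        have hlen2 : f.toList.length = x.toList.length := by
          rw [e1, e1] at hle; omega
        exact hf'.1 (String.toList_inj.mp (hinf.eq_of_length hlen2))
  · rintro ⟨f, hf, hq⟩
    have hpf : p f = true := List.mem_takeWhile_imp hf
    have hfs : f ∈ srt := (List.takeWhile_sublist p).subset hf
    exact ⟨f, (List.Nodup.mem_erase_iff hnd).mpr ⟨by simpa [hp] using hpf, hperm.mem_iff.mp hfs⟩, hq⟩

-- ===== VERDICT (by name: the statement is the Claim_ definition above) =====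
theorem get_subNodes_ofC1_spec : Claim_equal_get_subNodes_ofC1 := by
  intro c Dd _ _
  unfold Spec_get_subNodes_ofC1 get_subNodes_ofC1 get_subNodes_ofC1_alt
  have hccstep : (fun (acc : List String) d =>
        if PySem.Str.isIn c d then (if acc.contains d then acc else acc ++ [d]) else acc)
      = (fun acc d => if PySem.Str.isIn c d && !(acc.contains d) then acc ++ [d] else acc) := by
    funext acc d
    by_cases h2 : d ∈ acc <;> simp [h2]
  dsimp only
  rw [hccstep]
  have hccB : Dd.foldl (fun acc row =>
        if PySem.Str.isIn c (PySem.List.pyGetD row 0 "") && !(acc.contains (PySem.List.pyGetD row 0 ""))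
          then acc ++ [PySem.List.pyGetD row 0 ""] else acc) ([] : List String)
      = (Dd.map (fun d => PySem.List.pyGetD d 0 "")).foldl
          (fun acc d => if PySem.Str.isIn c d && !(acc.contains d) then acc ++ [d] else acc) [] :=
    by rw [List.foldl_map]
  rw [hccB]
  set cc : List String := (Dd.map (fun d => PySem.List.pyGetD d 0 "")).foldl
      (fun acc d => if PySem.Str.isIn c d && !(acc.contains d) then acc ++ [d] else acc) [] with hcc
  have hnd : cc.Nodup := nodup_dedupFoldl (fun d => PySem.Str.isIn c d) _ [] List.nodup_nil
  have houter : (fun (os : List String) d =>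
        ((PySem.List.remove? cc d).getD cc).foldl (fun os f =>
          if PySem.Str.isIn f d then (if os.contains d then os else os ++ [d]) else os) os)
      = (fun os d => if ((PySem.List.remove? cc d).getD cc).any (fun f => PySem.Str.isIn f d)
            && !(os.contains d) then os ++ [d] else os) := by
    funext os d; exact innerFoldA _ d _ os
  rw [houter]
  have hperm : (PySem.List.sorted cc (fun s => PySem.Str.len s) false).Perm cc :=
    PySem.List.sorted_perm cc (fun s => PySem.Str.len s) false
  have hsrtnd : (PySem.List.sorted cc (fun s => PySem.Str.len s) false).Nodup :=
    hperm.nodup_iff.mpr hnd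
  refine List.filter_congr ?_
  intro x hx
  have h1 : x ∈ cc.foldl (fun os d =>
        if ((PySem.List.remove? cc d).getD cc).any (fun f => PySem.Str.isIn f d)
          && !(os.contains d) then os ++ [d] else os) [] ↔
      x ∈ ((PySem.List.sorted cc (fun s => PySem.Str.len s) false).foldl
        (fun (p : List String × List String) d =>
          (if p.2.any (fun f => PySem.Str.isIn f d) then p.1 ++ [d] else p.1, p.2 ++ [d]))
        ([], [])).1 := by
    rw [mem_dedupFoldl, pairFoldFstMem _ _ hsrtnd]
    have hrm : (PySem.List.remove? cc x).getD cc = cc.erase x := by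
      rw [PySem.List.remove?_eq_some_erase cc x hx]; rfl
    simp only [List.not_mem_nil, false_or, List.nil_append, hrm, List.any_eq_true]
    rw [← pred_iff cc hnd x hx]
    simp [hx]
  have hcontains : (cc.foldl (fun os d =>
        if ((PySem.List.remove? cc d).getD cc).any (fun f => PySem.Str.isIn f d)
          && !(os.contains d) then os ++ [d] else os) []).contains x
      = (((PySem.List.sorted cc (fun s => PySem.Str.len s) false).foldl
        (fun (p : List String × List String) d =>
          (if p.2.any (fun f => PySem.Str.isIn f d) then p.1 ++ [d] else p.1, p.2 ++ [d]))
        ([], [])).1).contains x := by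
    rw [Bool.eq_iff_iff, List.contains_iff_mem, List.contains_iff_mem]
    exact h1
  rw [hcontains]
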